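-- pv_equiv track=rewrite | github.com/clastro/programmers | study/search/n_entrance.py | solution
-- ===== SOURCE A (Python) =====
-- def solution(n, times):
--     i = n-2
--     answer = 0
--     while(i>0):
--         if (i%2 == 0):
--             if(i == n-2):
--                 answer = times[0]
--             else:
--                 answer += 2 * times[0] - times[1]
--
--         else:
--             answer += times[1] - times[0]
--         i-=1
--     return answer
-- ===== SOURCE B (Python) =====
-- def solution(n, times):
--     m = n - 2
--     if m <= 0:
--         return 0
--     t0, t1 = times[0], times[1]
--     ev = m // 2           # even i in 1..m
--     od = m - ev           # odd i in 1..m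
--     ans = ev * (2 * t0 - t1) + od * (t1 - t0)
--     if m % 2 == 0:        # first term (i == n-2 even) is t0, not 2*t0-t1
--         ans += t1 - t0
--     return ans
-- ===== Notes on version B (the rewrite author's own statement) =====
-- stated objective: faster
-- what changed: Replaces the O(n) countdown loop with a closed-form O(1) sum: counts even and odd indices in 1..n-2, multiplies each count by its constant term, and corrects the first term when n-2 is even.
import Mathlib
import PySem

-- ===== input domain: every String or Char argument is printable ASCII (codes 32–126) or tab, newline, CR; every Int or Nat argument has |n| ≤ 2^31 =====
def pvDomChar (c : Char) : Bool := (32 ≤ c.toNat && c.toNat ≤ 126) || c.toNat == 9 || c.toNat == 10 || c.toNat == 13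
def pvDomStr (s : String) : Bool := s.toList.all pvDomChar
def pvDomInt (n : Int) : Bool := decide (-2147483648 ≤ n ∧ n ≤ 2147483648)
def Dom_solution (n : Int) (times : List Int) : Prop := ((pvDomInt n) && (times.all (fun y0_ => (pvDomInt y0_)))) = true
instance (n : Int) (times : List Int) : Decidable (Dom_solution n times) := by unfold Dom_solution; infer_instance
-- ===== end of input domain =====

-- B replaces A's O(n) countdown loop by a closed-form O(1) count of even/odd indices (objective: faster, asymptotic).

-- ===== PORT A =====
-- A's while-loop, counting i down from n-2 to 1; times[0]/times[1] via pyGetD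
-- (Pre_ guarantees they exist whenever the loop body runs, i.e. n ≥ 3).
def solutionLoop (n : Int) (times : List Int) (i : Int) (answer : Int) : Int :=
  if h : i > 0 then
    let answer' :=
      if PySem.Int.mod i 2 = 0 then
        if i = n - 2 then PySem.List.pyGetD times 0 0
        else answer + (2 * PySem.List.pyGetD times 0 0 - PySem.List.pyGetD times 1 0)
      else answer + (PySem.List.pyGetD times 1 0 - PySem.List.pyGetD times 0 0)
    solutionLoop n times (i - 1) answer'
  else answer
termination_by i.toNat
decreasing_by omega

def solution (n : Int) (times : List Int) : Int :=
  solutionLoop n times (n - 2) 0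

-- ===== PORT B =====
def solution_alt (n : Int) (times : List Int) : Int :=
  let m := n - 2
  if m ≤ 0 then 0
  else
    let t0 := PySem.List.pyGetD times 0 0
    let t1 := PySem.List.pyGetD times 1 0
    let ev := PySem.Int.floordiv m 2
    let od := m - ev
    let ans := ev * (2 * t0 - t1) + od * (t1 - t0)
    if PySem.Int.mod m 2 = 0 then ans + (t1 - t0) else ans

-- ===== PRECONDITION & SPEC =====
-- Pre_ excludes exactly the inputs where A raises IndexError: when n ≥ 3 the loop
-- body reads times[0] and times[1] (B reads them too and raises identically).
def Pre_solution (n : Int) (times : List Int) : Prop := n ≤ 2 ∨ 2 ≤ times.length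
instance (n : Int) (times : List Int) : Decidable (Pre_solution n times) := by
  unfold Pre_solution; infer_instance
def pvWitness_solution : Int × List Int := (7, [4, 6])

def Spec_solution (n : Int) (times : List Int) (out : Int) : Prop := out = solution_alt n times
instance (n : Int) (times : List Int) (out : Int) : Decidable (Spec_solution n times out) := by
  unfold Spec_solution; infer_instance

-- ===== CLAIM (what is proved, stated in full; the proofs are below) =====
def Claim_equal_solution : Prop := ∀ (n : Int) (times : List Int), Dom_solution n times → Pre_solution n times → Spec_solution n times (solution n times)

-- ===== LEMMAS AND PROOFS =====

-- closed form of the loop tail, for indices strictly below n-2 (A's reset branch never fires there)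
def tailSum (t0 t1 i : Int) : Int :=
  (i / 2) * (2 * t0 - t1) + (i - i / 2) * (t1 - t0)

-- loop invariant: below the first index, the loop adds tailSum
theorem solutionLoop_closed (n : Int) (times : List Int) :
    ∀ (i acc : Int), 0 ≤ i → i < n - 2 →
      solutionLoop n times i acc =
        acc + tailSum (PySem.List.pyGetD times 0 0) (PySem.List.pyGetD times 1 0) i := by
  intro i
  induction i using Int.induction_on with
  | zero => intro acc _ _; unfold solutionLoop tailSum; simp
  | pred k ih => intro acc h _; omega
  | succ k ih =>
    intro acc _ hlt
    set t0 := PySem.List.pyGetD times 0 0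
    set t1 := PySem.List.pyGetD times 1 0
    rw [solutionLoop]
    have hpos : ((k : Int) + 1) > 0 := by omega
    rw [dif_pos hpos]
    have hne : ¬ ((k : Int) + 1 = n - 2) := by omega
    rw [PySem.Int.mod_eq_emod_of_pos (b := 2) (by omega)]
    have hrec : solutionLoop n times ((k : Int) + 1 - 1) = solutionLoop n times (k : Int) := by
      norm_num
    by_cases hpar : ((k : Int) + 1) % 2 = 0
    · simp only [hpar, if_true, hne, if_false, hrec]
      rw [ih _ (by omega) (by omega)]
      unfold tailSum
      have h2 : ((k : Int) + 1) / 2 = (k : Int) / 2 + 1 ∧ (k : Int) % 2 = 1 := by omega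
      obtain ⟨hq, _⟩ := h2
      rw [hq]; ring
    · simp only [hpar, if_false, hrec]
      rw [ih _ (by omega) (by omega)]
      unfold tailSum
      have hq : ((k : Int) + 1) / 2 = (k : Int) / 2 := by omega
      rw [hq]; ring

-- ===== VERDICT (by name: the statement is the Claim_ definition above) =====
theorem solution_spec : Claim_equal_solution := by
  intro n times _ _
  unfold Spec_solution solution solution_alt
  dsimp only
  set t0 := PySem.List.pyGetD times 0 0
  set t1 := PySem.List.pyGetD times 1 0
  by_cases hm : n - 2 ≤ 0
  · rw [if_pos hm, solutionLoop, dif_neg (by omega : ¬ (n - 2 > 0))]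
  · have hpos : n - 2 > 0 := by omega
    rw [if_neg hm, solutionLoop, dif_pos hpos]
    rw [PySem.Int.mod_eq_emod_of_pos (b := 2) (by omega),
        PySem.Int.floordiv_eq_ediv_of_pos (b := 2) (by omega)]
    by_cases hpar : (n - 2) % 2 = 0
    · simp only [hpar, if_true]
      rw [solutionLoop_closed n times (n - 2 - 1) t0 (by omega) (by omega)]
      unfold tailSum
      have hq : (n - 2 - 1) / 2 = (n - 2) / 2 - 1 := by omega
      rw [hq]; ring
    · simp only [hpar, if_false]
      rw [solutionLoop_closed n times (n - 2 - 1) _ (by omega) (by omega)]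
      unfold tailSum
      have hq : (n - 2 - 1) / 2 = (n - 2) / 2 := by omega
      rw [hq]; ring
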